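-- pv_equiv track=rewrite | github.com/Sovik89/Scaler_inter_n_advanced | advanced_queue_n integers_containing_1_2_and_3.py | solve
-- ===== SOURCE A (Python) =====
-- from collections import deque
--
-- def solve(A):
--     #my_queue=queue.Queue()
--     my_deque=deque()
--
--     output_list=[]
--
--     # my_queue.put(1)
--     # my_queue.put(2)
--     # my_queue.put(3)
--     my_deque.append(1)
--     my_deque.append(2)
--     my_deque.append(3)
--
--     for i in range(A):
--         #x=my_queue.get()
--         x=my_deque.popleft()
--         output_list.append(x)
--         for j in range(1,4):
--             my_deque.append((10*x)+j)
--
--     return output_list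
-- ===== SOURCE B (Python) =====
-- def solve(A):
--     out = []
--     for i in range(1, A + 1):
--         n = i
--         digits = []
--         while n:
--             d = n % 3
--             if d == 0:
--                 digits.append(3)
--                 n = n // 3 - 1
--             else:
--                 digits.append(d)
--                 n //= 3
--         num = 0
--         for d in reversed(digits):
--             num = num * 10 + d
--         out.append(num)
--     return out
-- ===== Notes on version B (the rewrite author's own statement) =====
-- stated objective: alternative
-- what changed: Replaces A's BFS deque (pop head, push three children) by a direct per-index computation: each element is obtained from its index's bijective base-three representation over the nonzero ternary digits, so no queue state is kept.
import Mathlib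
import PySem

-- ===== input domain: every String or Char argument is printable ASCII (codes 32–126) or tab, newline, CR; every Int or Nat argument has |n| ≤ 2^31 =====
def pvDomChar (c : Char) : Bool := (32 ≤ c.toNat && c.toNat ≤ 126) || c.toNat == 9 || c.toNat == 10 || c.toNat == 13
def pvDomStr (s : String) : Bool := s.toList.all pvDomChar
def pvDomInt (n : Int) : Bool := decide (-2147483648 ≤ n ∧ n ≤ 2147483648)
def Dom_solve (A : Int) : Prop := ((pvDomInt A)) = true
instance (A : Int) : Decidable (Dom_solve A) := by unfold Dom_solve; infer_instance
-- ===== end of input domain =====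

-- B replaces A's BFS deque by computing each element directly from its index via
-- bijective base-3 digits (objective: alternative decomposition, no queue state).

-- ===== PORT A =====
-- loop body of A's 'for i in range(A)': pop the deque's head, append it to the
-- output, and push its three children 10*x+j (j = 1,2,3); the deque is never
-- empty, the [] branch only makes the match total.
def pvStepA (s : List Int × List Int) : List Int × List Int :=
  match s.1 with
  | [] => s
  | x :: rest =>
      (rest ++ (PySem.List.pyRange 1 4 1).map (fun j => 10 * x + j), s.2 ++ [x])

def solve (A : Int) : List Int :=
  ((PySem.List.pyRange 0 A 1).foldl (fun s _ => pvStepA s) (([1, 2, 3] : List Int), ([] : List Int))).2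

-- ===== PORT B =====
-- B's inner 'while n:' loop, collecting the bijective base-3 digits of n
-- least-significant first (exact for n ≥ 0, the only values reached).
def pvDigits (n : Nat) : List Int :=
  if n = 0 then []
  else if n % 3 = 0 then (3 : Int) :: pvDigits (n / 3 - 1)
  else ((n % 3 : Nat) : Int) :: pvDigits (n / 3)
termination_by n
decreasing_by all_goals omega

def solve_alt (A : Int) : List Int :=
  (PySem.List.pyRange 1 (A + 1) 1).foldl
    (fun out i =>
      -- i ≥ 1 throughout range(1, A+1), so i.toNat is exact
      let ds := pvDigits i.toNat
      out ++ [ds.reverse.foldl (fun num d => num * 10 + d) 0]) []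

-- ===== PRECONDITION & SPEC =====
def Spec_solve (A : Int) (out : List Int) : Prop := out = solve_alt A
instance (A : Int) (out : List Int) : Decidable (Spec_solve A out) := by unfold Spec_solve; infer_instance

-- ===== CLAIM (what is proved, stated in full; the proofs are below) =====
def Claim_equal_solve : Prop := ∀ (A : Int), Dom_solve A → Spec_solve A (solve A)

-- ===== LEMMAS AND PROOFS =====

-- the value B produces for 1-based index k
def pvG (k : Nat) : Int := (pvDigits k).reverse.foldl (fun num d => num * 10 + d) 0

lemma pvDigits_child (k j : Nat) (h1 : 1 ≤ j) (h2 : j ≤ 3) :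
    pvDigits (3 * k + j) = (j : Int) :: pvDigits k := by
  rw [pvDigits.eq_def]
  interval_cases j
  · have h3 : ¬ (3 * k + 1 = 0) := by omega
    have h4 : ¬ ((3 * k + 1) % 3 = 0) := by omega
    have h5 : (3 * k + 1) / 3 = k := by omega
    have h6 : (3 * k + 1) % 3 = 1 := by omega
    simp [h3, h4, h5, h6]
  · have h3 : ¬ (3 * k + 2 = 0) := by omega
    have h4 : ¬ ((3 * k + 2) % 3 = 0) := by omega
    have h5 : (3 * k + 2) / 3 = k := by omega
    have h6 : (3 * k + 2) % 3 = 2 := by omega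
    simp [h3, h4, h5, h6]
  · have h3 : ¬ (3 * k + 3 = 0) := by omega
    have h4 : (3 * k + 3) % 3 = 0 := by omega
    have h5 : (3 * k + 3) / 3 - 1 = k := by omega
    simp [h3, h4, h5]

lemma pvG_child (k j : Nat) (h1 : 1 ≤ j) (h2 : j ≤ 3) :
    pvG (3 * k + j) = 10 * pvG k + (j : Int) := by
  unfold pvG
  rw [pvDigits_child k j h1 h2]
  simp [List.foldl_append]
  ring

lemma pvG_zero : pvG 0 = 0 := by
  unfold pvG
  rw [pvDigits.eq_def]
  simp

-- BFS invariant: after n pops, the deque holds the values of indices n+1 … 3n+3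
-- and the output the values of indices 1 … n.
lemma pvInvariant (n : Nat) :
    pvStepA^[n] (([1, 2, 3] : List Int), ([] : List Int)) =
      ((List.range' (n + 1) (2 * n + 3)).map pvG, (List.range' 1 n).map pvG) := by
  induction n with
  | zero =>
      have g1 : pvG 1 = 1 := by have := pvG_child 0 1 (by omega) (by omega); simpa [pvG_zero] using this
      have g2 : pvG 2 = 2 := by have := pvG_child 0 2 (by omega) (by omega); simpa [pvG_zero] using this
      have g3 : pvG 3 = 3 := by have := pvG_child 0 3 (by omega) (by omega); simpa [pvG_zero] using this
      simp [List.range', g1, g2, g3]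
  | succ n ih =>
      rw [Function.iterate_succ_apply', ih]
      have hr : List.range' (n + 1) (2 * n + 3) = (n + 1) :: List.range' (n + 2) (2 * n + 2) := by
        rw [List.range'_succ]
      rw [hr]
      unfold pvStepA
      simp only [List.map_cons]
      have hpy : (PySem.List.pyRange 1 4 1) = [1, 2, 3] := by decide
      rw [hpy]
      have c1 := pvG_child (n + 1) 1 (by omega) (by omega)
      have c2 := pvG_child (n + 1) 2 (by omega) (by omega)
      have c3 := pvG_child (n + 1) 3 (by omega) (by omega)
      have hd : List.range' (n + 2) (2 * (n + 1) + 3) =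
          List.range' (n + 2) (2 * n + 2) ++ [3 * (n + 1) + 1, 3 * (n + 1) + 2, 3 * (n + 1) + 3] := by
        have e1 : 2 * (n + 1) + 3 = (2 * n + 2) + 1 + 1 + 1 := by omega
        rw [e1, List.range'_concat, List.range'_concat, List.range'_concat]
        simp
        omega
      have ho : List.range' 1 (n + 1) = List.range' 1 n ++ [n + 1] := by
        rw [List.range'_concat]
        simp [Nat.add_comm]
      rw [hd, ho]
      simp [c1, c2, c3]

-- a fold that only appends one element per input is a map
lemma pvFoldAppend (h : Int → Int) :
    ∀ (l : List Int) (acc : List Int),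
      l.foldl (fun out i => out ++ [h i]) acc = acc ++ l.map h := by
  intro l
  induction l with
  | nil => intro acc; simp
  | cons x xs ih => intro acc; simp [ih]

-- a fold ignoring its elements is an iterate
lemma pvFoldIterate (l : List Int) (init : List Int × List Int) :
    l.foldl (fun s _ => pvStepA s) init = pvStepA^[l.length] init := by
  induction l generalizing init with
  | nil => simp
  | cons x xs ih => simp [ih, Function.iterate_succ_apply]

lemma solve_eq (A : Int) : solve A = (List.range' 1 A.toNat).map pvG := by
  unfold solve
  rw [pvFoldIterate]
  have hl : (PySem.List.pyRange 0 A 1).length = A.toNat := by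
    rw [PySem.List.length_pyRange_one]; simp
  rw [hl, pvInvariant]

lemma solve_alt_eq (A : Int) : solve_alt A = (List.range' 1 A.toNat).map pvG := by
  unfold solve_alt
  rw [pvFoldAppend (fun i => (pvDigits i.toNat).reverse.foldl (fun num d => num * 10 + d) 0)]
  rw [PySem.List.pyRange_one]
  have hb : (A + 1 - 1).toNat = A.toNat := by omega
  rw [hb, List.range'_eq_map_range]
  simp only [List.map_map, List.nil_append]
  apply List.map_congr_left
  intro k _
  show (pvDigits ((1 : Int) + (k : Int)).toNat).reverse.foldl (fun num d => num * 10 + d) 0 = pvG (1 + k)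
  have : ((1 : Int) + (k : Int)).toNat = 1 + k := by omega
  rw [this]
  rfl

-- ===== VERDICT (by name: the statement is the Claim_ definition above) =====
theorem solve_spec : Claim_equal_solve := by
  intro A _
  unfold Spec_solve
  rw [solve_eq, solve_alt_eq]
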